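-- pv_equiv track=rewrite | github.com/smutaogroup/tem1_acylation_pathfitting | 7.feat.sele/0.man.sele/1.shff_dat.build/shff.build.py | shuffle_feature
-- ===== SOURCE A (Python) =====
-- def shuffle_feature(ds, shff_feat_ids, ):
--     '''shuffle feature from feature_id in ds.
--     shff_feat_ids must be a list.
--     '''
--
--     shff_ds = []
--
--     for d in ds:
--         shff_d = []
--
--         for i in range(len(d)):
--
--             if i in shff_feat_ids:
--                 shff_d.append(0)
--
--             else:
--                 shff_d.append(d[i])
--
--         shff_ds.append(shff_d)
--
--     return shff_ds
-- ===== SOURCE B (Python) =====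
-- def shuffle_feature(ds, shff_feat_ids, ):
--     '''shuffle feature from feature_id in ds.
--     shff_feat_ids must be a list.
--     '''
--     shff_ds = []
--     for d in ds:
--         shff_d = list(d)
--         for idx in shff_feat_ids:
--             if 0 <= idx < len(shff_d):
--                 shff_d[idx] = 0
--         shff_ds.append(shff_d)
--     return shff_ds
-- ===== Notes on version B (the rewrite author's own statement) =====
-- stated objective: simpler
-- what changed: Instead of scanning shff_feat_ids for membership at every column, B copies the row once and overwrites only the in-range listed indices with 0.
import Mathlib
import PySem

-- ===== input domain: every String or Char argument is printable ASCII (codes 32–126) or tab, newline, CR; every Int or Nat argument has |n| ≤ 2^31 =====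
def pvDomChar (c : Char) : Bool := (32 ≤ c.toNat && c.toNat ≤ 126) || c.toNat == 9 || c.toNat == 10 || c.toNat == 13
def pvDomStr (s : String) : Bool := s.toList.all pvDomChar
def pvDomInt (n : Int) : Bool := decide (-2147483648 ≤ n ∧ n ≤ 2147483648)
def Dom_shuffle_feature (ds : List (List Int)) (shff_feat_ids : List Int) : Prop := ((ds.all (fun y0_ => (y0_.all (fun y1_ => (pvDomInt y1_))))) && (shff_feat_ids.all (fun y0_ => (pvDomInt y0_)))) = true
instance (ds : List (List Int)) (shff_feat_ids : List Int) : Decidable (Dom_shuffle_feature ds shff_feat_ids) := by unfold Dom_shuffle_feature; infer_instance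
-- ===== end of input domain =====

-- B zeroes listed columns by copying each row once and overwriting the in-range ids, instead of a per-column membership scan (simpler/faster).


-- ===== PORT A =====
-- inner loop: for i in range(len(d)): append 0 if i in shff_feat_ids else d[i]
def shuffleRowA (d : List Int) (shff_feat_ids : List Int) : List Int :=
  (List.range d.length).foldl
    (fun shff_d (i : Nat) => shff_d ++ [if ((i : Int)) ∈ shff_feat_ids then 0 else d.getD i 0]) []

def shuffle_feature (ds : List (List Int)) (shff_feat_ids : List Int) : List (List Int) :=
  ds.foldl (fun shff_ds d => shff_ds ++ [shuffleRowA d shff_feat_ids]) []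

-- ===== PORT B =====
-- shff_d[idx] = 0 when 0 <= idx < len(shff_d), else ignored
def setZero (shff_d : List Int) (idx : Int) : List Int :=
  if 0 ≤ idx ∧ idx < shff_d.length then shff_d.set idx.toNat 0 else shff_d

def shuffle_feature_alt (ds : List (List Int)) (shff_feat_ids : List Int) : List (List Int) :=
  ds.foldl (fun shff_ds d => shff_ds ++ [shff_feat_ids.foldl setZero d]) []

-- ===== PRECONDITION & SPEC =====
def Spec_shuffle_feature (ds : List (List Int)) (shff_feat_ids : List Int) (out : List (List Int)) : Prop := out = shuffle_feature_alt ds shff_feat_ids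
instance (ds : List (List Int)) (shff_feat_ids : List Int) (out : List (List Int)) : Decidable (Spec_shuffle_feature ds shff_feat_ids out) := by unfold Spec_shuffle_feature; infer_instance

-- ===== CLAIM (what is proved, stated in full; the proofs are below) =====
def Claim_equal_shuffle_feature : Prop := ∀ (ds : List (List Int)) (shff_feat_ids : List Int), Dom_shuffle_feature ds shff_feat_ids → Spec_shuffle_feature ds shff_feat_ids (shuffle_feature ds shff_feat_ids)

-- ===== LEMMAS AND PROOFS =====

theorem length_foldl_setZero (ids : List Int) (d : List Int) :
    (ids.foldl setZero d).length = d.length := by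
  induction ids generalizing d with
  | nil => rfl
  | cons idx rest ih =>
      simp only [List.foldl_cons, ih]
      unfold setZero; split_ifs <;> simp

theorem getElem_foldl_setZero (ids : List Int) (d : List Int) (i : Nat) (hi : i < d.length) :
    (ids.foldl setZero d)[i]'(by rw [length_foldl_setZero]; exact hi) =
      if ((i : Int)) ∈ ids then 0 else d[i] := by
  induction ids generalizing d with
  | nil => simp
  | cons idx rest ih =>
      have hlen : (setZero d idx).length = d.length := by
        unfold setZero; split_ifs <;> simp
      have hi' : i < (setZero d idx).length := by rw [hlen]; exact hi
      simp only [List.foldl_cons]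
      rw [ih (setZero d idx) hi']
      by_cases hmem : ((i : Int)) ∈ rest
      · simp [hmem]
      · by_cases heq : idx = ((i : Int))
        · have hset : (setZero d idx)[i]'hi' = 0 := by
            unfold setZero
            have h1 : 0 ≤ idx ∧ idx < (d.length : Int) := by omega
            have h2 : idx.toNat = i := by omega
            simp [h1, h2]
          have hm : ((i : Int)) ∈ idx :: rest := by simp [heq]
          rw [if_neg hmem, hset, if_pos hm]
        · have hne : ¬ ((i : Int)) = idx := by omega
          have hset : (setZero d idx)[i]'hi' = d[i] := by
            unfold setZero
            split_ifs with h
            · have h2 : idx.toNat ≠ i := by omega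
              simp [List.getElem_set_ne h2]
            · rfl
          simp [hmem, hne, hset, List.mem_cons]

theorem row_eq (d : List Int) (ids : List Int) :
    shuffleRowA d ids = ids.foldl setZero d := by
  unfold shuffleRowA
  rw [PySem.List.foldl_append_singleton_eq_map]
  apply List.ext_getElem
  · simp [length_foldl_setZero]
  · intro i h1 h2
    have hi : i < d.length := by simpa using h1
    rw [getElem_foldl_setZero ids d i hi]
    simp [hi]

-- ===== VERDICT (by name: the statement is the Claim_ definition above) =====
theorem shuffle_feature_spec : Claim_equal_shuffle_feature := by
  intro ds ids _
  unfold Spec_shuffle_feature shuffle_feature shuffle_feature_alt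
  simp only [row_eq]
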